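-- pv_equiv track=rewrite | github.com/Greggwolin/landscape | backend/apps/documents/extractors/document_classifier.py | _group_sections
-- ===== SOURCE A (Python) =====
-- from typing import List, Dict, Tuple, Optional
--
-- def _group_sections(page_classifications: Dict[int, str], total_pages: int) -> Dict[str, List[int]]:
--     """
--     Group consecutive pages of same type into sections.
--
--     Also handles interpolation: if pages 10 and 12 are both "rent_roll",
--     assume page 11 is also "rent_roll" if it's unclassified.
--     """
--
--     sections = {
--         'rent_roll': [],
--         'operating_statement': [],
--         'parcel_table': [],
--         'site_plan': [],
--         'financial_summary': [],
--         'market_analysis': [],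
--         'unclassified': []
--     }
--
--     # First pass: collect all classified pages
--     for page_num, classification in page_classifications.items():
--         sections[classification].append(page_num)
--
--     # Second pass: interpolate gaps in multi-page sections
--     for doc_type in ['rent_roll', 'operating_statement', 'parcel_table']:
--         pages = sections[doc_type]
--         if len(pages) < 2:
--             continue
--
--         pages_sorted = sorted(pages)
--         filled_pages = []
--
--         for i in range(len(pages_sorted)):
--             filled_pages.append(pages_sorted[i])
--
--             # Check gap to next page
--             if i < len(pages_sorted) - 1:
--                 current = pages_sorted[i]
--                 next_page = pages_sorted[i + 1]
--                 gap = next_page - current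
--
--                 # If gap is small (1-2 pages) and those pages are unclassified,
--                 # assume they're part of this section
--                 if gap <= 3:
--                     for gap_page in range(current + 1, next_page):
--                         if page_classifications.get(gap_page) == 'unclassified':
--                             filled_pages.append(gap_page)
--                             # Remove from unclassified
--                             if gap_page in sections['unclassified']:
--                                 sections['unclassified'].remove(gap_page)
--
--         sections[doc_type] = sorted(list(set(filled_pages)))
--
--     return sections
-- ===== SOURCE B (Python) =====
-- def _absorbable(page_set, u):
--     """Can unclassified page u be absorbed between two section pages at distance <= 3?"""
--     below = 1 if u - 1 in page_set else 2 if u - 2 in page_set else None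
--     above = 1 if u + 1 in page_set else 2 if u + 2 in page_set else None
--     return below is not None and above is not None and below + above <= 3
--
--
-- def _group_sections(page_classifications, total_pages):
--     sections = {
--         'rent_roll': [],
--         'operating_statement': [],
--         'parcel_table': [],
--         'site_plan': [],
--         'financial_summary': [],
--         'market_analysis': [],
--         'unclassified': []
--     }
--
--     for page_num, classification in page_classifications.items():
--         sections[classification].append(page_num)
--
--     # Snapshot of the pages whose classification is 'unclassified' (the
--     # interpolation always tests the immutable page_classifications map).
--     unclassified_pages = list(sections['unclassified'])
--
--     for doc_type in ['rent_roll', 'operating_statement', 'parcel_table']: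
--         pages = sections[doc_type]
--         if len(pages) < 2:
--             continue
--
--         # Instead of enumerating gap ranges between consecutive pages, test each
--         # unclassified page once against its O(1) neighbourhood in the page set:
--         # it is absorbed iff section pages straddle it at total distance <= 3.
--         page_set = set(pages)
--         absorbed = [u for u in unclassified_pages if _absorbable(page_set, u)]
--         absorbed.sort()
--
--         for u in absorbed:
--             if u in sections['unclassified']:
--                 sections['unclassified'].remove(u)
--
--         sections[doc_type] = sorted(pages + absorbed)
--
--     return sections
-- ===== Notes on version B (the rewrite author's own statement) =====
-- stated objective: alternative
-- what changed: A enumerates every integer in the gap range between each pair of consecutive same-type pages and scans those ranges for unclassified pages; B instead tests each unclassified page once against an O(1) neighbourhood (distance <= 2 on each side) in a set of the section's pages, absorbing it iff section pages straddle it within total distance 3.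
import Mathlib
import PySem

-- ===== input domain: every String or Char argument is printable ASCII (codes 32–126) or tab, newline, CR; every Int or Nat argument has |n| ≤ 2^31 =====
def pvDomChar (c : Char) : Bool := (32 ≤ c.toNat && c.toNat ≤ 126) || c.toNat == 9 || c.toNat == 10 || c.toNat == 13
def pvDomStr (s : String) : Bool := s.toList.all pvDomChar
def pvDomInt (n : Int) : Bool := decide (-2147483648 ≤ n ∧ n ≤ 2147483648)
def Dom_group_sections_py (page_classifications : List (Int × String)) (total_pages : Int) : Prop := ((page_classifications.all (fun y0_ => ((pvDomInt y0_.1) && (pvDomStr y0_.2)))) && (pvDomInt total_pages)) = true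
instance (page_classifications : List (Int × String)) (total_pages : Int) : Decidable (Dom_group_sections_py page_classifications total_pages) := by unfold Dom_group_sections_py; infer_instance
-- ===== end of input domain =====

-- B replaces A's per-gap integer-range enumeration by an O(1) straddling-neighbourhood test of each
-- unclassified page against a set of the section's pages (objective: alternative; same return value).

-- ===== PORT A =====

-- the literal sections dict of A (and B)
def pvSections0 : PySem.Dict String (List Int) :=
  PySem.Dict.mk [("rent_roll", []), ("operating_statement", []), ("parcel_table", []),
                 ("site_plan", []), ("financial_summary", []), ("market_analysis", []),
                 ("unclassified", [])]

-- first pass (identical lines in A and in B): sections[classification].append(page_num)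
def pvFirstPass (pc : List (Int × String)) : PySem.Dict String (List Int) :=
  pc.foldl (fun secs kv => secs.modify kv.2 [] (fun l => l ++ [kv.1])) pvSections0

-- shared snippet "if g in sections['unclassified']: sections['unclassified'].remove(g)"
def pvRemoveUncl (secs : PySem.Dict String (List Int)) (g : Int) : PySem.Dict String (List Int) :=
  if g ∈ secs.getD "unclassified" [] then
    secs.modify "unclassified" [] (fun l => (PySem.List.remove? l g).getD l)
  else secs

-- A's inner loop: for gap_page in range(current+1, next_page): ...
def pvGapLoop (pc : List (Int × String)) (cur nxt : Int)
    (st : List Int × PySem.Dict String (List Int)) : List Int × PySem.Dict String (List Int) :=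
  (PySem.List.pyRange (cur + 1) nxt 1).foldl
    (fun st g =>
      if (PySem.Dict.mk pc).get? g == some "unclassified" then
        (st.1 ++ [g], pvRemoveUncl st.2 g)
      else st) st

-- A's "for i in range(len(pages_sorted))" with accesses pages_sorted[i] / pages_sorted[i+1],
-- as the obvious structural recursion on the suffix (rest ≠ [] ↔ i < len - 1)
def pvFillLoop (pc : List (Int × String)) :
    List Int → List Int × PySem.Dict String (List Int) → List Int × PySem.Dict String (List Int)
  | [], st => st
  | a :: rest, st =>
    let st1 := (st.1 ++ [a], st.2)
    let st2 :=
      match rest with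
      | [] => st1
      | b :: _ => if b - a ≤ 3 then pvGapLoop pc a b st1 else st1
    pvFillLoop pc rest st2

-- one iteration of A's "for doc_type in [...]" loop
def pvAStep (pc : List (Int × String)) (secs : PySem.Dict String (List Int)) (d : String) :
    PySem.Dict String (List Int) :=
  let pages := secs.getD d []
  if pages.length < 2 then secs
  else
    let pagesSorted := PySem.List.sorted pages (fun x => x)
    let r := pvFillLoop pc pagesSorted ([], secs)
    r.2.insert d (PySem.List.sorted (PySem.Set.ofList r.1) (fun x => x))

def group_sections_py (page_classifications : List (Int × String)) (total_pages : Int) :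
    List (String × List Int) :=
  (["rent_roll", "operating_statement", "parcel_table"].foldl
      (pvAStep page_classifications) (pvFirstPass page_classifications)).items

-- ===== PORT B =====

-- helper _absorbable(page_set, u) of B
def pvAbsorbable (pageSet : PySem.Set Int) (u : Int) : Bool :=
  let below : Option Int :=
    if PySem.Set.contains pageSet (u - 1) then some 1
    else if PySem.Set.contains pageSet (u - 2) then some 2
    else none
  let above : Option Int :=
    if PySem.Set.contains pageSet (u + 1) then some 1
    else if PySem.Set.contains pageSet (u + 2) then some 2
    else none
  match below, above with
  | some x, some y => x + y ≤ 3
  | _, _ => false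

-- one iteration of B's "for doc_type in [...]" loop (uncl = the snapshot unclassified_pages)
def pvBStep (pc : List (Int × String)) (uncl : List Int)
    (secs : PySem.Dict String (List Int)) (d : String) : PySem.Dict String (List Int) :=
  let pages := secs.getD d []
  if pages.length < 2 then secs
  else
    let pageSet := PySem.Set.ofList pages
    let absorbed := uncl.filter (fun u => pvAbsorbable pageSet u)
    let absorbedSorted := PySem.List.sorted absorbed (fun x => x)
    let secs2 := absorbedSorted.foldl pvRemoveUncl secs
    secs2.insert d (PySem.List.sorted (pages ++ absorbedSorted) (fun x => x))

def group_sections_py_alt (page_classifications : List (Int × String)) (total_pages : Int) :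
    List (String × List Int) :=
  let secs := pvFirstPass page_classifications
  let unclassifiedPages := secs.getD "unclassified" []
  (["rent_roll", "operating_statement", "parcel_table"].foldl
      (pvBStep page_classifications unclassifiedPages) secs).items

-- ===== PRECONDITION & SPEC =====
def pvNames : List String :=
  ["rent_roll", "operating_statement", "parcel_table", "site_plan", "financial_summary",
   "market_analysis", "unclassified"]

-- Pre_ excludes (a) inputs whose classification string is not one of the seven section names — there
-- Python A raises KeyError (and so does B) — and (b) association lists with duplicate page keys,
-- which do not represent a Python dict (the argument is a dict, so its keys are distinct).
def Pre_group_sections_py (page_classifications : List (Int × String)) (total_pages : Int) : Prop :=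
  (page_classifications.map Prod.fst).Nodup ∧ ∀ kv ∈ page_classifications, kv.2 ∈ pvNames

instance (page_classifications : List (Int × String)) (total_pages : Int) :
    Decidable (Pre_group_sections_py page_classifications total_pages) := by
  unfold Pre_group_sections_py; infer_instance

def pvWitness_group_sections_py : (List (Int × String)) × Int :=
  ([(1, "rent_roll"), (3, "rent_roll"), (2, "unclassified")], 3)

def Spec_group_sections_py (page_classifications : List (Int × String)) (total_pages : Int)
    (out : List (String × List Int)) : Prop :=
  out = group_sections_py_alt page_classifications total_pages

instance (page_classifications : List (Int × String)) (total_pages : Int)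
    (out : List (String × List Int)) : Decidable (Spec_group_sections_py page_classifications total_pages out) := by
  unfold Spec_group_sections_py; infer_instance

-- ===== CLAIM (what is proved, stated in full; the proofs are below) =====
def Claim_equal_group_sections_py : Prop := ∀ (page_classifications : List (Int × String)) (total_pages : Int), Dom_group_sections_py page_classifications total_pages → Pre_group_sections_py page_classifications total_pages → Spec_group_sections_py page_classifications total_pages (group_sections_py page_classifications total_pages)

-- ===== LEMMAS AND PROOFS =====

-- proof-side descriptions of what both second passes compute
def pvPages (pc : List (Int × String)) (d : String) : List Int :=
  (pc.filter (fun kv => kv.2 == d)).map (fun kv => kv.1)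

def pvU (pc : List (Int × String)) (g : Int) : Bool :=
  (PySem.Dict.mk pc).get? g == some "unclassified"

def pvGapL (pc : List (Int × String)) (a b : Int) : List Int :=
  (PySem.List.pyRange (a + 1) b 1).filter (pvU pc)

def pvFill (pc : List (Int × String)) : Int → List Int → List Int
  | _, [] => []
  | a, b :: t => (if b - a ≤ 3 then pvGapL pc a b else []) ++ b :: pvFill pc b t

def pvGaps (pc : List (Int × String)) : Int → List Int → List Int
  | _, [] => []
  | a, b :: t => (if b - a ≤ 3 then pvGapL pc a b else []) ++ pvGaps pc b t

lemma pvPages_nodup (pc : List (Int × String)) (d : String)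
    (h : (pc.map Prod.fst).Nodup) : (pvPages pc d).Nodup := by
  have hs : ((pc.filter (fun kv => kv.2 == d)).map (fun kv => kv.1)).Sublist (pc.map (fun kv => kv.1)) :=
    (List.filter_sublist (l := pc)).map _
  exact List.Nodup.sublist hs h

lemma mem_pvPages (pc : List (Int × String)) (d : String) (x : Int) :
    x ∈ pvPages pc d ↔ (x, d) ∈ pc := by
  simp only [pvPages, List.mem_map, List.mem_filter, beq_iff_eq]
  constructor
  · rintro ⟨⟨k, v⟩, ⟨hm, rfl⟩, rfl⟩; exact hm
  · intro hm; exact ⟨(x, d), ⟨hm, rfl⟩, rfl⟩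

lemma get?_mk_iff (pc : List (Int × String)) (h : (pc.map Prod.fst).Nodup) (x : Int) (v : String) :
    (PySem.Dict.mk pc).get? x = some v ↔ (x, v) ∈ pc := by
  constructor
  · intro hg; exact PySem.Dict.mem_items_of_get?_eq_some _ hg
  · intro hm
    exact PySem.Dict.get?_of_mem_items _ hm h

lemma firstPass_getD (pc : List (Int × String)) (c : String) :
    (pvFirstPass pc).getD c [] = pvPages pc c := by
  have hfold : pvFirstPass pc =
      (pc.map Prod.swap).foldl (fun d p => d.modify p.1 [] (fun x => x ++ [p.2])) pvSections0 := by
    rw [List.foldl_map]; rfl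
  rw [hfold, PySem.Dict.getD_foldl_modify_append]
  have h0 : pvSections0.getD c [] = [] := by
    rw [PySem.Dict.getD_eq_get?_getD]
    simp only [pvSections0, PySem.Dict.get?_mk_cons]
    split_ifs <;> rfl
  rw [h0]
  simp [pvPages, List.filter_map, List.map_map, Function.comp_def]

lemma removeUncl_getD_other (secs : PySem.Dict String (List Int)) (g : Int) (c : String)
    (hc : c ≠ "unclassified") : (pvRemoveUncl secs g).getD c [] = secs.getD c [] := by
  unfold pvRemoveUncl
  split
  · rw [PySem.Dict.getD_modify]; simp [hc]
  · rfl

lemma remFold_getD_other (G : List Int) (secs : PySem.Dict String (List Int)) (c : String)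
    (hc : c ≠ "unclassified") : (G.foldl pvRemoveUncl secs).getD c [] = secs.getD c [] := by
  induction G generalizing secs with
  | nil => rfl
  | cons g G ih => rw [List.foldl_cons, ih, removeUncl_getD_other _ _ _ hc]

lemma gapLoop_char (pc : List (Int × String)) (a b : Int) (f : List Int)
    (secs : PySem.Dict String (List Int)) :
    pvGapLoop pc a b (f, secs) = (f ++ pvGapL pc a b, (pvGapL pc a b).foldl pvRemoveUncl secs) := by
  unfold pvGapLoop pvGapL
  generalize PySem.List.pyRange (a + 1) b 1 = L
  induction L generalizing f secs with
  | nil => simp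
  | cons g L ih =>
    by_cases hg : pvU pc g
    · have hg' : ((PySem.Dict.mk pc).get? g == some "unclassified") = true := hg
      simp only [List.foldl_cons, List.filter_cons, hg', if_true]
      rw [ih]
      simp [hg]
    · have hg' : ((PySem.Dict.mk pc).get? g == some "unclassified") = false := by
        simpa [pvU] using hg
      simp only [List.foldl_cons, List.filter_cons, hg', Bool.false_eq_true, if_false]
      rw [ih]
      simp [Bool.eq_false_iff.mpr hg]

lemma fillLoop_char (pc : List (Int × String)) (S : List Int) (a : Int) (f : List Int)
    (secs : PySem.Dict String (List Int)) :
    pvFillLoop pc (a :: S) (f, secs) =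
      (f ++ a :: pvFill pc a S, (pvGaps pc a S).foldl pvRemoveUncl secs) := by
  induction S generalizing a f secs with
  | nil => simp [pvFillLoop, pvFill, pvGaps]
  | cons b t ih =>
    have hstep : pvFillLoop pc (a :: b :: t) (f, secs) =
        pvFillLoop pc (b :: t)
          (if b - a ≤ 3 then pvGapLoop pc a b (f ++ [a], secs) else (f ++ [a], secs)) := rfl
    rw [hstep]
    by_cases hg : b - a ≤ 3
    · rw [if_pos hg, gapLoop_char, ih]
      simp [pvFill, pvGaps, hg, List.foldl_append, List.append_assoc]
    · rw [if_neg hg, ih]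
      simp [pvFill, pvGaps, hg]

lemma mem_pvGapL (pc : List (Int × String)) (a b x : Int) :
    x ∈ pvGapL pc a b ↔ a < x ∧ x < b ∧ pvU pc x = true := by
  simp only [pvGapL, List.mem_filter, PySem.List.mem_pyRange_one]
  constructor
  · rintro ⟨⟨h1, h2⟩, h3⟩; exact ⟨by omega, h2, h3⟩
  · rintro ⟨h1, h2, h3⟩; exact ⟨⟨by omega, h2⟩, h3⟩

lemma mem_pvFill (pc : List (Int × String)) (S : List Int) (a x : Int) :
    x ∈ pvFill pc a S ↔ x ∈ S ∨ x ∈ pvGaps pc a S := by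
  induction S generalizing a with
  | nil => simp [pvFill, pvGaps]
  | cons b t ih =>
    simp only [pvFill, pvGaps, List.mem_append, List.mem_cons, ih]
    tauto

lemma pvGaps_sublist (pc : List (Int × String)) (S : List Int) (a : Int) :
    (pvGaps pc a S).Sublist (pvFill pc a S) := by
  induction S generalizing a with
  | nil => simp [pvFill, pvGaps]
  | cons b t ih =>
    simp only [pvFill, pvGaps]
    exact (List.Sublist.refl _).append ((ih b).cons b)

lemma pvFill_pairwise (pc : List (Int × String)) (S : List Int) (a : Int)
    (h : (a :: S).Pairwise (· < ·)) : (a :: pvFill pc a S).Pairwise (· < ·) := by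
  induction S generalizing a with
  | nil => simp [pvFill]
  | cons b t ih =>
    rw [List.pairwise_cons] at h
    obtain ⟨hall, hbt⟩ := h
    have hab : a < b := hall b (by simp)
    have ihb := ih b hbt
    have hmemfill : ∀ y ∈ b :: pvFill pc b t, b ≤ y := by
      intro y hy
      rcases List.mem_cons.mp hy with rfl | hy'
      · exact le_refl _
      · exact le_of_lt ((List.pairwise_cons.mp ihb).1 y hy')
    have hG : ∀ x ∈ (if b - a ≤ 3 then pvGapL pc a b else []), a < x ∧ x < b := by
      intro x hx
      split at hx
      · have := (mem_pvGapL pc a b x).mp hx; exact ⟨this.1, this.2.1⟩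
      · simp at hx
    have hGpw : (if b - a ≤ 3 then pvGapL pc a b else []).Pairwise (· < ·) := by
      split
      · exact List.Pairwise.filter _ (PySem.List.pairwise_lt_pyRange_one _ _)
      · exact List.Pairwise.nil
    rw [show pvFill pc a (b :: t) = (if b - a ≤ 3 then pvGapL pc a b else []) ++ b :: pvFill pc b t from rfl]
    rw [List.pairwise_cons]
    constructor
    · intro y hy
      rcases List.mem_append.mp hy with hy' | hy'
      · exact (hG y hy').1
      · exact lt_of_lt_of_le hab (hmemfill y hy')
    · rw [List.pairwise_append]
      refine ⟨hGpw, ihb, ?_⟩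
      intro x hx y hy
      exact lt_of_lt_of_le (hG x hx).2 (hmemfill y hy)

lemma pvGaps_forward (pc : List (Int × String)) (S : List Int) (a u : Int)
    (h : u ∈ pvGaps pc a S) :
    pvU pc u = true ∧ ∃ p q, p ∈ a :: S ∧ q ∈ a :: S ∧ p < u ∧ u < q ∧ q - p ≤ 3 := by
  induction S generalizing a with
  | nil => simp [pvGaps] at h
  | cons b t ih =>
    rw [show pvGaps pc a (b :: t) = (if b - a ≤ 3 then pvGapL pc a b else []) ++ pvGaps pc b t from rfl,
        List.mem_append] at h
    rcases h with h | h
    · split at h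
      · have hm := (mem_pvGapL pc a b u).mp h
        exact ⟨hm.2.2, a, b, by simp, by simp, hm.1, hm.2.1, by omega⟩
      · simp at h
    · obtain ⟨hu, p, q, hp, hq, h1, h2, h3⟩ := ih b h
      exact ⟨hu, p, q, List.mem_cons_of_mem _ hp, List.mem_cons_of_mem _ hq, h1, h2, h3⟩

lemma pvGaps_backward (pc : List (Int × String)) (S : List Int) (a u p q : Int)
    (hpw : (a :: S).Pairwise (· < ·)) (hu : pvU pc u = true) (hnot : u ∉ a :: S)
    (hp : p ∈ a :: S) (hq : q ∈ a :: S) (hpu : p < u) (huq : u < q) (hqp : q - p ≤ 3) :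
    u ∈ pvGaps pc a S := by
  induction S generalizing a p q with
  | nil =>
    simp only [List.mem_singleton] at hp hq
    omega
  | cons b t ih =>
    rw [List.pairwise_cons] at hpw
    obtain ⟨hall, hbt⟩ := hpw
    have hab : a < b := hall b (by simp)
    have hmem_ge : ∀ x ∈ b :: t, b ≤ x := by
      intro x hx
      rcases List.mem_cons.mp hx with rfl | hx'
      · exact le_refl _
      · exact le_of_lt ((List.pairwise_cons.mp hbt).1 x hx')
    rw [show pvGaps pc a (b :: t) = (if b - a ≤ 3 then pvGapL pc a b else []) ++ pvGaps pc b t from rfl,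
        List.mem_append]
    rcases lt_trichotomy u b with hub | hub | hub
    · -- u falls in the first gap; p must be a, q must be in b :: t
      have hpa : p = a := by
        rcases List.mem_cons.mp hp with rfl | hp'
        · rfl
        · exact absurd (hmem_ge p hp') (by omega)
      have hqb : b ≤ q := by
        rcases List.mem_cons.mp hq with rfl | hq'
        · omega
        · exact hmem_ge q hq'
      left
      rw [if_pos (by omega)]
      exact (mem_pvGapL pc a b u).mpr ⟨by omega, hub, hu⟩
    · exact absurd (by simp [hub] : u ∈ a :: b :: t) hnot
    · -- recurse into b :: t
      right
      have hq' : q ∈ b :: t := by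
        rcases List.mem_cons.mp hq with rfl | hq'
        · omega
        · exact hq'
      have hnot' : u ∉ b :: t := fun hmem => hnot (List.mem_cons_of_mem _ hmem)
      rcases List.mem_cons.mp hp with rfl | hp'
      · -- p = a: replace it by b
        exact ih b b q hbt hnot' (by simp) hq' hub huq (by omega)
      · exact ih b p q hbt hnot' hp' hq' hpu huq hqp

lemma absorbable_iff (ps : PySem.Set Int) (u : Int) :
    pvAbsorbable ps u = true ↔ ∃ p q : Int, p ∈ ps ∧ q ∈ ps ∧ p < u ∧ u < q ∧ q - p ≤ 3 := by
  constructor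
  · intro hT
    by_cases h1 : (u - 1) ∈ ps
    · by_cases h3 : (u + 1) ∈ ps
      · exact ⟨u - 1, u + 1, h1, h3, by omega, by omega, by omega⟩
      · by_cases h4 : (u + 2) ∈ ps
        · exact ⟨u - 1, u + 2, h1, h4, by omega, by omega, by omega⟩
        · exfalso; simp [pvAbsorbable, h1, h3, h4] at hT
    · by_cases h2 : (u - 2) ∈ ps
      · by_cases h3 : (u + 1) ∈ ps
        · exact ⟨u - 2, u + 1, h2, h3, by omega, by omega, by omega⟩
        · by_cases h4 : (u + 2) ∈ ps
          · exfalso; simp [pvAbsorbable, h1, h2, h3, h4] at hT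
          · exfalso; simp [pvAbsorbable, h1, h2, h3, h4] at hT
      · exfalso; simp [pvAbsorbable, h1, h2] at hT
  · rintro ⟨p, q, hp, hq, hpu, huq, hqp⟩
    have hp' : p = u - 1 ∨ p = u - 2 := by omega
    have hq' : q = u + 1 ∨ q = u + 2 := by omega
    by_cases h1 : (u - 1) ∈ ps
    · by_cases h3 : (u + 1) ∈ ps
      · simp [pvAbsorbable, h1, h3]
      · have h4 : (u + 2) ∈ ps := by rcases hq' with rfl | rfl; exact absurd hq h3; exact hq
        simp [pvAbsorbable, h1, h3, h4]
    · have h2 : (u - 2) ∈ ps := by rcases hp' with rfl | rfl; exact absurd hp h1; exact hp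
      have hpe : p = u - 2 := by rcases hp' with rfl | rfl; exact absurd hp h1; rfl
      have h3 : (u + 1) ∈ ps := by
        rcases hq' with rfl | rfl
        · exact hq
        · omega
      simp [pvAbsorbable, h1, h2, h3]

lemma step_eq (pc : List (Int × String)) (secs : PySem.Dict String (List Int)) (d : String)
    (hnd : (pc.map Prod.fst).Nodup) (hdu : d ≠ "unclassified")
    (hpages : secs.getD d [] = pvPages pc d) :
    pvAStep pc secs d = pvBStep pc (pvPages pc "unclassified") secs d := by
  simp only [pvAStep, pvBStep]
  rw [hpages]
  by_cases hlen : (pvPages pc d).length < 2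
  · rw [if_pos hlen, if_pos hlen]
  · rw [if_neg hlen, if_neg hlen]
    -- notation
    set P := pvPages pc d with hP
    set U := pvPages pc "unclassified" with hU
    have hPnd : P.Nodup := pvPages_nodup pc d hnd
    have hUnd : U.Nodup := pvPages_nodup pc "unclassified" hnd
    have hmemP : ∀ x : Int, x ∈ P ↔ (PySem.Dict.mk pc).get? x = some d := by
      intro x; rw [hP, mem_pvPages, get?_mk_iff pc hnd]
    have hmemU : ∀ x : Int, x ∈ U ↔ pvU pc x = true := by
      intro x; rw [hU, mem_pvPages, pvU, beq_iff_eq, get?_mk_iff pc hnd]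
    -- the sorted page list is nonempty
    obtain ⟨s0, S', hS⟩ : ∃ s0 S', PySem.List.sorted P (fun x => x) = s0 :: S' := by
      cases hSl : PySem.List.sorted P (fun x => x) with
      | nil =>
        exfalso
        have hlS := PySem.List.length_sorted P (fun x => x) false
        rw [hSl] at hlS
        simp at hlS
        rw [← hlS] at hlen
        simp at hlen
      | cons a l => exact ⟨a, l, rfl⟩
    have hSperm : (s0 :: S').Perm P := by rw [← hS]; exact PySem.List.sorted_perm P _ _
    have hSnd : (s0 :: S').Nodup := hSperm.nodup_iff.mpr hPnd
    have hSle : (s0 :: S').Pairwise (· ≤ ·) := by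
      have := PySem.List.sorted_pairwise P (fun x => x)
      rw [hS] at this; exact this
    have hSpw : (s0 :: S').Pairwise (· < ·) :=
      List.Pairwise.imp₂ (fun _ _ hle hne => lt_of_le_of_ne hle hne) hSle hSnd
    have hmemS : ∀ x : Int, x ∈ s0 :: S' ↔ x ∈ P := fun x => hSperm.mem_iff
    -- A's filled list
    have hfillpw : (s0 :: pvFill pc s0 S').Pairwise (· < ·) := pvFill_pairwise pc S' s0 hSpw
    have hfillnd : (s0 :: pvFill pc s0 S').Nodup := hfillpw.imp ne_of_lt
    have hGpw : (pvGaps pc s0 S').Pairwise (· < ·) :=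
      List.Pairwise.sublist ((pvGaps_sublist pc S' s0).trans (List.sublist_cons_self s0 _)) hfillpw
    have hGnd : (pvGaps pc s0 S').Nodup := hGpw.imp ne_of_lt
    -- gap pages carry classification 'unclassified', hence are disjoint from P
    have hGU' : ∀ x ∈ pvGaps pc s0 S', pvU pc x = true := fun x hx => (pvGaps_forward pc S' s0 x hx).1
    have hdisj : ∀ x ∈ P, x ∉ pvGaps pc s0 S' := by
      intro x hxP hxG
      have h1 := (hmemP x).mp hxP
      have h2 := hGU' x hxG
      rw [pvU, beq_iff_eq, h1] at h2
      exact hdu (by simpa using h2)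
    -- gaps = absorbed unclassified pages
    have hGabs : ∀ x : Int, x ∈ pvGaps pc s0 S' ↔
        x ∈ U.filter (fun u => pvAbsorbable (PySem.Set.ofList P) u) := by
      intro x
      rw [List.mem_filter]
      constructor
      · intro hx
        obtain ⟨hu, p, q, hp, hq, h1, h2, h3⟩ := pvGaps_forward pc S' s0 x hx
        refine ⟨(hmemU x).mpr hu, (absorbable_iff _ _).mpr ⟨p, q, ?_, ?_, h1, h2, h3⟩⟩
        · rw [PySem.Set.mem_ofList]; exact (hmemS p).mp hp
        · rw [PySem.Set.mem_ofList]; exact (hmemS q).mp hq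
      · rintro ⟨hxU, habs⟩
        obtain ⟨p, q, hp, hq, h1, h2, h3⟩ := (absorbable_iff _ _).mp habs
        rw [PySem.Set.mem_ofList] at hp hq
        have hxnot : x ∉ s0 :: S' := by
          intro hxS
          have h1' := (hmemP x).mp ((hmemS x).mp hxS)
          have h2' := (hmemU x).mp hxU
          rw [pvU, beq_iff_eq, h1'] at h2'
          exact hdu (by simpa using h2')
        exact pvGaps_backward pc S' s0 x p q hSpw ((hmemU x).mp hxU) hxnot
          ((hmemS p).mpr hp) ((hmemS q).mpr hq) h1 h2 h3
    -- absorbed, sorted, IS the gap list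
    have habs : PySem.List.sorted (U.filter (fun u => pvAbsorbable (PySem.Set.ofList P) u)) (fun x => x) =
        pvGaps pc s0 S' := by
      apply PySem.List.sorted_eq_of_perm_of_pairwise_lt _ _ _ _ hGpw
      exact (List.perm_ext_iff_of_nodup hGnd (hUnd.filter _)).mpr hGabs
    -- A's inserted list
    have hAlist : PySem.List.sorted (PySem.Set.ofList (s0 :: pvFill pc s0 S')) (fun x => x) =
        s0 :: pvFill pc s0 S' := by
      apply PySem.List.sorted_eq_of_perm_of_pairwise_lt _ _ _ _ hfillpw
      exact (List.perm_ext_iff_of_nodup hfillnd (PySem.Set.nodup_ofList _)).mpr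
        (fun a => (PySem.Set.mem_ofList _ a).symm)
    -- B's inserted list
    have hBlist : PySem.List.sorted (P ++ pvGaps pc s0 S') (fun x => x) = s0 :: pvFill pc s0 S' := by
      apply PySem.List.sorted_eq_of_perm_of_pairwise_lt _ _ _ _ hfillpw
      apply (List.perm_ext_iff_of_nodup hfillnd (List.Nodup.append hPnd hGnd ?_)).mpr ?_
      · intro x hxP hxG; exact hdisj x hxP hxG
      · intro a
        rw [List.mem_append]
        constructor
        · intro ha
          rcases List.mem_cons.mp ha with rfl | ha'
          · exact Or.inl ((hmemS a).mp (by simp))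
          · rcases (mem_pvFill pc S' s0 a).mp ha' with h | h
            · exact Or.inl ((hmemS a).mp (by simp [h]))
            · exact Or.inr h
        · intro ha
          rcases ha with ha | ha
          · rcases List.mem_cons.mp ((hmemS a).mpr ha) with rfl | h
            · exact List.mem_cons_self
            · exact List.mem_cons_of_mem _ ((mem_pvFill pc S' s0 a).mpr (Or.inl h))
          · exact List.mem_cons_of_mem _ ((mem_pvFill pc S' s0 a).mpr (Or.inr ha))
    -- assemble
    rw [hS, fillLoop_char, habs, List.nil_append, hAlist, hBlist]

lemma step_getD_other (pc : List (Int × String)) (secs : PySem.Dict String (List Int))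
    (d c : String) (hcd : c ≠ d) (hcu : c ≠ "unclassified") :
    (pvAStep pc secs d).getD c [] = secs.getD c [] := by
  simp only [pvAStep]
  by_cases hlen : (secs.getD d []).length < 2
  · rw [if_pos hlen]
  · rw [if_neg hlen]
    cases hSl : PySem.List.sorted (secs.getD d []) (fun x => x) with
    | nil =>
      simp only [pvFillLoop]
      rw [PySem.Dict.getD_insert]
      simp [hcd]
    | cons a l =>
      rw [fillLoop_char, PySem.Dict.getD_insert]
      simp only [hcd, if_false]
      exact remFold_getD_other _ _ _ hcu

-- ===== VERDICT (by name: the statement is the Claim_ definition above) =====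
theorem group_sections_py_spec : Claim_equal_group_sections_py := by
  intro pc tp _hdom hpre
  obtain ⟨hnd, _hvals⟩ := hpre
  unfold Spec_group_sections_py group_sections_py group_sections_py_alt
  simp only [List.foldl_cons, List.foldl_nil]
  rw [firstPass_getD pc "unclassified"]
  have h1 : pvAStep pc (pvFirstPass pc) "rent_roll" =
      pvBStep pc (pvPages pc "unclassified") (pvFirstPass pc) "rent_roll" :=
    step_eq pc _ _ hnd (by decide) (firstPass_getD pc _)
  have e2 : (pvAStep pc (pvFirstPass pc) "rent_roll").getD "operating_statement" [] =
      pvPages pc "operating_statement" := by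
    rw [step_getD_other pc _ _ _ (by decide) (by decide), firstPass_getD]
  have h2 : pvAStep pc (pvAStep pc (pvFirstPass pc) "rent_roll") "operating_statement" =
      pvBStep pc (pvPages pc "unclassified")
        (pvAStep pc (pvFirstPass pc) "rent_roll") "operating_statement" :=
    step_eq pc _ _ hnd (by decide) e2
  have e3 : (pvAStep pc (pvAStep pc (pvFirstPass pc) "rent_roll") "operating_statement").getD
      "parcel_table" [] = pvPages pc "parcel_table" := by
    rw [step_getD_other pc _ _ _ (by decide) (by decide),
        step_getD_other pc _ _ _ (by decide) (by decide), firstPass_getD]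
  have h3 : pvAStep pc (pvAStep pc (pvAStep pc (pvFirstPass pc) "rent_roll")
        "operating_statement") "parcel_table" =
      pvBStep pc (pvPages pc "unclassified")
        (pvAStep pc (pvAStep pc (pvFirstPass pc) "rent_roll") "operating_statement")
        "parcel_table" :=
    step_eq pc _ _ hnd (by decide) e3
  rw [h3, h2, h1]
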